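-- pv_equiv track=rewrite | github.com/holbizmetrics/prime-alphabet-finder | prime_encoder_extended.py | mersenne_primes
-- ===== SOURCE A (Python) =====
-- import math
-- from typing import Dict, List, Tuple, Callable, Optional, Set
--
-- def is_prime(n: int) -> bool:
--     if n < 2: return False
--     if n == 2: return True
--     if n % 2 == 0: return False
--     for i in range(3, int(math.sqrt(n)) + 1, 2):
--         if n % i == 0: return False
--     return True
--
-- def mersenne_primes(limit: int) -> List[int]:
--     """Find Mersenne primes 2^p - 1 up to limit."""
--     mersennes = []
--     p = 2
--     while True:
--         m = (1 << p) - 1  # 2^p - 1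
--         if m > limit: break
--         if is_prime(m):
--             mersennes.append(m)
--         p += 1
--     return mersennes
-- ===== SOURCE B (Python) =====
-- import math
--
-- def _is_prime_exp(p: int) -> bool:
--     if p < 2:
--         return False
--     return all(p % i != 0 for i in range(2, math.isqrt(p) + 1))
--
-- def _lucas_lehmer(p: int) -> bool:
--     """Lucas-Lehmer primality test for 2^p - 1, exact for prime p (p == 2 special-cased)."""
--     if p == 2:
--         return True
--     m = (1 << p) - 1
--     s = 4
--     for _ in range(p - 2):
--         s = (s * s - 2) % m
--     return s == 0
--
-- def mersenne_primes(limit: int) -> list: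
--     """Find Mersenne primes 2^p - 1 up to limit."""
--     mersennes = []
--     p = 2
--     while (1 << p) - 1 <= limit:
--         if _is_prime_exp(p) and _lucas_lehmer(p):
--             mersennes.append((1 << p) - 1)
--         p += 1
--     return mersennes
-- ===== Notes on version B (the rewrite author's own statement) =====
-- stated objective: faster
-- what changed: Replaces trial division of each Mersenne candidate 2^p-1 (exponentially many divisions in p) by the Lucas-Lehmer test run only on prime exponents p (p-2 modular squarings per exponent).
import Mathlib
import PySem

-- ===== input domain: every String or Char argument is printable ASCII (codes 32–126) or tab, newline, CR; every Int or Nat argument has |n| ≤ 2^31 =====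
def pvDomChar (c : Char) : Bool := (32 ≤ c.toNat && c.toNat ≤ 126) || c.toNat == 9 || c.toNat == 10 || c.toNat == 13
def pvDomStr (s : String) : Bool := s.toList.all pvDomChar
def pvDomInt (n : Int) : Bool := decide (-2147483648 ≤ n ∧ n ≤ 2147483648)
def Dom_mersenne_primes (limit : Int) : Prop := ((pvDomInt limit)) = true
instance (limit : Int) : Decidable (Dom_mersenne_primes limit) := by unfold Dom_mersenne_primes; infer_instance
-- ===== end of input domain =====

-- B replaces A's trial division of 2^p-1 (exponentially many divisions) by a Lucas-Lehmer
-- test on prime exponents p (O(p) modular squarings per exponent): objective = faster.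

-- ===== PORT A =====

-- 17-step binary search for ⌊√n⌋; exact for every n ≤ 2^31, hence equal to Python's
-- int(math.sqrt(n)) on the arguments A's loop ever passes (float sqrt is exact there).
-- (A fuel-free structural definition: the kernel can evaluate it, unlike Nat.sqrt.)
def isqrtGo (n : Nat) : Nat → Nat → Nat → Nat
  | 0, lo, _ => lo
  | f + 1, lo, hi =>
    let mid := (lo + hi + 1) / 2
    if mid * mid ≤ n then isqrtGo n f mid hi else isqrtGo n f lo (mid - 1)

def isqrt (n : Nat) : Nat := isqrtGo n 17 0 65535

-- port of A's is_prime: trial division by odd i in range(3, int(sqrt(n)) + 1, 2)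
def is_prime (n : Int) : Bool :=
  if n < 2 then false
  else if n = 2 then true
  else if PySem.Int.mod n 2 = 0 then false
  else (PySem.List.pyRange 3 ((isqrt n.toNat : Int) + 1) 2).all
        (fun i => !(PySem.Int.mod n i == 0))

-- p < 2^p for every p (termination of the while loops: p grows, 2^p - 1 ≤ limit bounds it)
theorem le_two_pow_int (p : Nat) : (p : Int) ≤ 2 ^ p - 1 := by
  have h := Nat.lt_two_pow_self (n := p)
  have : (p : Int) + 1 ≤ (2 : Int) ^ p := by exact_mod_cast h
  omega

-- A's while loop: p = 2, 3, 4, …; break as soon as m = 2^p - 1 > limit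
def mersenneLoop (limit : Int) (p : Nat) : List Int :=
  if (2 : Int) ^ p - 1 > limit then []
  else if is_prime ((2 : Int) ^ p - 1) then
    ((2 : Int) ^ p - 1) :: mersenneLoop limit (p + 1)
  else mersenneLoop limit (p + 1)
termination_by (limit + 1 - p).toNat
decreasing_by all_goals have := le_two_pow_int p; omega

def mersenne_primes (limit : Int) : List Int := mersenneLoop limit 2

-- ===== PORT B =====

-- port of Source B's _is_prime_exp: trial division on the (small) exponent
def is_prime_exp (p : Nat) : Bool :=
  if p < 2 then false
  else (PySem.List.pyRange 2 ((isqrt p : Int) + 1) 1).all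
        (fun i => !(PySem.Int.mod p i == 0))

-- port of Source B's _lucas_lehmer: s := 4; p-2 times s := (s*s - 2) % (2^p - 1); prime ↔ s = 0
def lucas_lehmer (p : Nat) : Bool :=
  if p = 2 then true
  else
    let m : Int := 2 ^ p - 1
    let s := (List.range (p - 2)).foldl (fun s _ => PySem.Int.mod (s * s - 2) m) 4
    s == 0

-- B's while loop: while 2^p - 1 ≤ limit, test the exponent, then Lucas-Lehmer
def mersenneLoopAlt (limit : Int) (p : Nat) : List Int :=
  if (2 : Int) ^ p - 1 ≤ limit then
    if is_prime_exp p && lucas_lehmer p then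
      ((2 : Int) ^ p - 1) :: mersenneLoopAlt limit (p + 1)
    else mersenneLoopAlt limit (p + 1)
  else []
termination_by (limit + 1 - p).toNat
decreasing_by all_goals have := le_two_pow_int p; omega

def mersenne_primes_alt (limit : Int) : List Int := mersenneLoopAlt limit 2

-- ===== PRECONDITION & SPEC =====
def Spec_mersenne_primes (limit : Int) (out : List Int) : Prop := out = mersenne_primes_alt limit
instance (limit : Int) (out : List Int) : Decidable (Spec_mersenne_primes limit out) := by unfold Spec_mersenne_primes; infer_instance

-- ===== CLAIM (what is proved, stated in full; the proofs are below) =====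
def Claim_equal_mersenne_primes : Prop := ∀ (limit : Int), Dom_mersenne_primes limit → Spec_mersenne_primes limit (mersenne_primes limit)

-- ===== LEMMAS AND PROOFS =====

-- Pointwise agreement of the two per-candidate tests on every exponent the loops can reach
-- under Dom (2^p - 1 ≤ limit ≤ 2^31 forces p < 32): trial division of 2^p - 1 decides the
-- same Bool as "p prime and Lucas-Lehmer passes".
set_option maxRecDepth 100000 in
theorem key : ∀ p : Nat, p < 32 → 2 ≤ p →
    is_prime ((2 : Int) ^ p - 1) = (is_prime_exp p && lucas_lehmer p) := by decide

theorem loops_eq (limit : Int) (hlim : limit ≤ 2147483648) (p : Nat) (hp : 2 ≤ p) :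
    mersenneLoop limit p = mersenneLoopAlt limit p := by
  rw [mersenneLoop.eq_def, mersenneLoopAlt.eq_def]
  by_cases h : (2 : Int) ^ p - 1 > limit
  · rw [if_pos h, if_neg (by omega)]
  · have hple : p < 32 := by
      by_contra hc
      push Not at hc
      have h2 : (2 : Int) ^ 32 ≤ 2 ^ p := by
        apply pow_le_pow_right₀ (by norm_num) hc
      have h32 : (2 : Int) ^ 32 = 4294967296 := by norm_num
      omega
    have ih := loops_eq limit hlim (p + 1) (by omega)
    rw [if_neg h, key p hple hp,
      if_pos (show (2 : Int) ^ p - 1 ≤ limit from by omega), ih]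
termination_by (limit + 1 - p).toNat
decreasing_by have := le_two_pow_int p; omega

-- ===== VERDICT (by name: the statement is the Claim_ definition above) =====
theorem mersenne_primes_spec : Claim_equal_mersenne_primes := by
  intro limit hdom
  have hlim : limit ≤ 2147483648 := by
    simp [Dom_mersenne_primes, pvDomInt] at hdom
    omega
  exact loops_eq limit hlim 2 (by omega)
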